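-- pv_equiv track=rewrite | github.com/Rethy729/Rosalind_BA | BA4/BA4E/BA4E.py | printeverypeptide
-- ===== SOURCE A (Python) =====
-- protein_mass = {'G':57, 'A':71, 'S':87, 'P':97, 'V':99, 'T':101, 'C':103, 'L':113, 'N':114, 'D':115, 'Q':128, 'E':129, 'M':131, 'H':137, 'F':147, 'R':156, 'Y':163, 'W':186} #exiled I(113), K(128)
--
-- def printeverypeptide(peptide): #peptide with the same cyclosequence = round + reverse and round
--
--     total_peptide = []
--     peptide_rev = peptide[::-1]
--     peptide_2 = peptide*2
--     peptide_rev_2 = peptide_rev*2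
--     for i in range(len(peptide)):
--         total_peptide.append(peptide_2[i:i+len(peptide)])
--         total_peptide.append(peptide_rev_2[i:i+len(peptide)])
--
--     aa_mass = []
--     for peptide in total_peptide:
--         temp_aa = []
--         for aa in peptide:
--             temp_aa.append(protein_mass[aa])
--         aa_mass.append(temp_aa)
--
--     return aa_mass
-- ===== SOURCE B (Python) =====
-- protein_mass = {'G':57, 'A':71, 'S':87, 'P':97, 'V':99, 'T':101, 'C':103, 'L':113, 'N':114, 'D':115, 'Q':128, 'E':129, 'M':131, 'H':137, 'F':147, 'R':156, 'Y':163, 'W':186}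
--
-- def printeverypeptide(peptide):
--     # map to masses once; build forward rotations incrementally (no doubling, no
--     # re-slicing from scratch); the reverse-strand row for offset i is a symmetry
--     # of the forward rows: it equals rows[-i] reversed, so it is never recomputed.
--     masses = [protein_mass[c] for c in peptide]
--     rows = []
--     cur = masses
--     for _ in masses:
--         rows.append(cur)
--         cur = cur[1:] + cur[:1]
--     out = []
--     for i, row in enumerate(rows):
--         out.append(row)
--         out.append(rows[-i][::-1])
--     return out
-- ===== Notes on version B (the rewrite author's own statement) =====
-- stated objective: alternative
-- what changed: B maps each character to its mass exactly once, builds the forward rotations incrementally (cur = cur[1:] + cur[:1]) instead of slicing a doubled string per offset, and never computes the reverse-strand rotations: the reverse row at offset i is derived from the forward rows by the symmetry rows[-i][::-1], eliminating both the reversed copy's rotation pass and A's second full pass of per-character dict lookups.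
import Mathlib
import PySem

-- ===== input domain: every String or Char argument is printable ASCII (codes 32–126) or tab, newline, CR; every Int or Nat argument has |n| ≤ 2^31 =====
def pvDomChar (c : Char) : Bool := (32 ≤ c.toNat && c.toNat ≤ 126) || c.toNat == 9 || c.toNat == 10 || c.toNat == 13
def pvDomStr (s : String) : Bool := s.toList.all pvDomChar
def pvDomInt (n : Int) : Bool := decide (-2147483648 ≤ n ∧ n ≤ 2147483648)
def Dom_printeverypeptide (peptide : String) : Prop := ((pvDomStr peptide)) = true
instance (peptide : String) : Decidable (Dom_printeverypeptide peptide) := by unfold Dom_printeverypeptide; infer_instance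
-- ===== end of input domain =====

-- B maps each character to its mass once, builds the forward rotations incrementally
-- (cur = cur[1:] + cur[:1]; no doubled lists, no per-offset slicing of a doubled copy),
-- and never computes the reverse-strand rotations at all: the reverse row at offset i
-- is obtained by the symmetry rows[-i][::-1]. Objective: alternative (same asymptotics).

-- the module-level dict protein_mass
def pmass : PySem.Dict Char Int := PySem.Dict.ofList
  [('G',57), ('A',71), ('S',87), ('P',97), ('V',99), ('T',101), ('C',103), ('L',113),
   ('N',114), ('D',115), ('Q',128), ('E',129), ('M',131), ('H',137), ('F',147), ('R',156),
   ('Y',163), ('W',186)]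

-- ===== PORT A =====
-- protein_mass[aa]: under Pre_ every character is a key, so getD's default is never used
-- (Python raises KeyError exactly where pmass.contains is false; Pre_ excludes those inputs).
def printeverypeptide (peptide : String) : List (List Int) :=
  let s := peptide.toList
  let peptide_rev := ((PySem.List.slice? s none none (-1)).getD [])   -- peptide[::-1]
  let peptide_2 := s ++ s                                             -- peptide*2
  let peptide_rev_2 := peptide_rev ++ peptide_rev                     -- peptide_rev*2
  let total_peptide :=
    (PySem.List.pyRange 0 (s.length) 1).foldl
      (fun acc i =>
        (acc ++ [PySem.List.slice peptide_2 (some i) (some (i + s.length))])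
             ++ [PySem.List.slice peptide_rev_2 (some i) (some (i + s.length))]) []
  total_peptide.foldl
    (fun aa_mass p =>
      aa_mass ++ [p.foldl (fun temp_aa aa => temp_aa ++ [pmass.getD aa 0]) []]) []

-- ===== PORT B =====
-- rows[-i] is an in-range index for every i the loop reaches, so pyGet?'s default [] is dead.
def printeverypeptide_alt (peptide : String) : List (List Int) :=
  let masses := peptide.toList.map (fun c => pmass.getD c 0)
  let rows := (masses.foldl
      (fun (st : List (List Int) × List Int) _ =>
        (st.1 ++ [st.2],
         PySem.List.slice st.2 (some 1) none ++ PySem.List.slice st.2 none (some 1)))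
      ([], masses)).1
  (PySem.List.enumerate rows).foldl
    (fun out p =>
      (out ++ [p.2]) ++
        [(PySem.List.slice? ((PySem.List.pyGet? rows (-p.1)).getD []) none none (-1)).getD []])
    []

-- ===== PRECONDITION & SPEC =====
-- Pre_ excludes exactly the inputs on which A raises KeyError: a character outside the
-- 18-key mass table (both A and B raise there).
def Pre_printeverypeptide (peptide : String) : Prop :=
  peptide.toList.all (fun c => pmass.contains c) = true
instance (peptide : String) : Decidable (Pre_printeverypeptide peptide) := by
  unfold Pre_printeverypeptide; infer_instance
def pvWitness_printeverypeptide : String := "GASP"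
def Spec_printeverypeptide (peptide : String) (out : List (List Int)) : Prop := out = printeverypeptide_alt peptide
instance (peptide : String) (out : List (List Int)) : Decidable (Spec_printeverypeptide peptide out) := by unfold Spec_printeverypeptide; infer_instance

-- ===== CLAIM (what is proved, stated in full; the proofs are below) =====
def Claim_equal_printeverypeptide : Prop := ∀ (peptide : String), Dom_printeverypeptide peptide → Pre_printeverypeptide peptide → Spec_printeverypeptide peptide (printeverypeptide peptide)

-- ===== LEMMAS AND PROOFS =====

-- rotation of a list by j positions (proof-only abbreviation)
def rotL (j : Nat) (s : List Int) : List Int := s.drop j ++ s.take j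

theorem rotL_step (s : List Int) (j : Nat) (h : j < s.length) :
    (rotL j s).drop 1 ++ (rotL j s).take 1 = rotL (j + 1) s := by
  unfold rotL
  rw [List.drop_eq_getElem_cons h]
  simp only [List.cons_append, List.drop_succ_cons, List.drop_zero,
    List.take_zero, List.take_add_one, List.getElem?_eq_getElem h]
  simp [List.append_assoc]

-- invariant of B's first loop: after consuming t the accumulated rows are
-- acc ++ [rotation j, rotation j+1, …]
theorem build_inv (s : List Int) (t : List Int) :
    ∀ (acc : List (List Int)) (j : Nat), j + t.length ≤ s.length →
    (t.foldl
      (fun (st : List (List Int) × List Int) _ =>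
        (st.1 ++ [st.2],
         PySem.List.slice st.2 (some 1) none ++ PySem.List.slice st.2 none (some 1)))
      (acc, rotL j s)).1
      = acc ++ (List.range t.length).map (fun i => rotL (j + i) s) := by
  induction t with
  | nil => intro acc j _; simp
  | cons x xs ih =>
      intro acc j hlen
      simp only [List.foldl_cons, List.length_cons] at *
      have e1 : PySem.List.slice (rotL j s) (some 1) none = (rotL j s).drop 1 := by
        simpa using PySem.List.slice_from_natCast (rotL j s) 1
      have e2 : PySem.List.slice (rotL j s) none (some 1) = (rotL j s).take 1 := by
        simpa using PySem.List.slice_to_natCast (rotL j s) 1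
      rw [e1, e2, rotL_step s j (by omega), ih (acc ++ [rotL j s]) (j + 1) (by omega)]
      rw [List.range_succ_eq_map]
      simp only [List.map_cons, List.map_map, List.append_assoc, List.singleton_append,
        Nat.add_zero]
      congr 2
      apply List.map_congr_left
      intro i _
      simp only [Function.comp_apply]
      congr 1
      omega

-- Python rows[-k] in B: the negatively-indexed forward rotation, reversed, is the
-- reverse-strand rotation at offset k
theorem pyget_neg (M : List Int) (n k : Nat) (hM : M.length = n) (hk : k < n) :
    ((PySem.List.pyGet? ((List.range n).map (fun i => rotL i M)) (-(k : Int))).getD []).reverse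
      = rotL k M.reverse := by
  have hn0 : 0 < n := Nat.pos_of_ne_zero (by omega)
  rcases Nat.eq_zero_or_pos k with hk0 | hkpos
  · subst hk0
    simp only [Nat.cast_zero, neg_zero, PySem.List.pyGet?, PySem.List.pyIdx?, List.length_map,
      List.length_range]
    rw [if_pos le_rfl, if_pos (by exact_mod_cast hn0)]
    simp only [Int.toNat_zero, Option.bind_some,
      List.getElem?_eq_getElem (by simpa using hn0 : (0:Nat) < ((List.range n).map (fun i => rotL i M)).length)]
    simp [rotL, List.getElem_map, List.getElem_range]
  · have hneg : (-(k : Int)) < 0 := by exact_mod_cast Int.neg_neg_of_pos (by exact_mod_cast hkpos)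
    simp only [PySem.List.pyGet?, PySem.List.pyIdx?, List.length_map, List.length_range]
    rw [if_neg (by omega), if_pos (by omega)]
    have : (-(-(k:Int))).toNat = k := by omega
    rw [this]
    simp only [Option.bind_some]
    have hlt : n - k < n := by omega
    rw [List.getElem?_eq_getElem (by simpa using hlt)]
    simp only [List.getElem_map, List.getElem_range, Option.getD_some]
    unfold rotL
    rw [List.reverse_append, List.drop_reverse, List.take_reverse, hM]

-- slicing the doubled list equals rotate-by-concatenation (used on A's side)
theorem slice_doubled {α : Type} (s : List α) (k : ℕ) (hk : k ≤ s.length) :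
    PySem.List.slice (s ++ s) (some (k : Int)) (some ((k : Int) + (s.length : Int))) =
      s.drop k ++ s.take k := by
  have h := PySem.List.slice_natCast_add (xs := s ++ s) (j := k) (n := s.length)
  rw [h, List.drop_append_of_le_length hk]
  rw [List.take_append]
  congr 1
  · exact List.take_of_length_le (by simp)
  · congr 1
    simp
    omega

theorem printeverypeptide_spec' (peptide : String)
    (_hpre : Pre_printeverypeptide peptide) :
    printeverypeptide peptide = printeverypeptide_alt peptide := by
  unfold printeverypeptide printeverypeptide_alt
  simp only [PySem.List.slice?_none_none_neg_one, Option.getD_some]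
  set s := peptide.toList with hs
  set f : Char → Int := fun c => pmass.getD c 0 with hf
  set M : List Int := s.map f with hM
  set n : Nat := s.length with hn
  have hMlen : M.length = n := by simp [hM, hn]
  -- A's first loop as a flatMap
  have loop1 :
      (PySem.List.pyRange 0 (s.length) 1).foldl
        (fun acc i =>
          (acc ++ [PySem.List.slice (s ++ s) (some i) (some (i + s.length))])
               ++ [PySem.List.slice (s.reverse ++ s.reverse) (some i) (some (i + s.length))]) [] =
      (PySem.List.pyRange 0 (s.length) 1).flatMap
        (fun i => [PySem.List.slice (s ++ s) (some i) (some (i + s.length)),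
                   PySem.List.slice (s.reverse ++ s.reverse) (some i) (some (i + s.length))]) := by
    have := PySem.List.foldl_append_eq_flatMap
      (l := PySem.List.pyRange 0 (s.length) 1)
      (g := fun i => [PySem.List.slice (s ++ s) (some i) (some (i + s.length)),
                      PySem.List.slice (s.reverse ++ s.reverse) (some i) (some (i + s.length))])
      (acc := [])
    simpa [List.append_assoc] using this
  rw [loop1, PySem.List.foldl_append_singleton_eq_map (acc := [])]
  simp only [List.nil_append, List.map_flatMap]
  -- B's first loop: rows = all forward rotations of M
  have h0 : rotL 0 M = M := by simp [rotL]
  have hrows :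
      (M.foldl
        (fun (st : List (List Int) × List Int) _ =>
          (st.1 ++ [st.2],
           PySem.List.slice st.2 (some 1) none ++ PySem.List.slice st.2 none (some 1)))
        ([], M)).1 = (List.range n).map (fun i => rotL i M) := by
    have hb := build_inv M M ([]) 0 (by omega)
    rw [h0] at hb
    rw [hb, hMlen]
    simp
  rw [hrows]
  set rows : List (List Int) := (List.range n).map (fun i => rotL i M) with hrowsdef
  have hrowslen : rows.length = n := by simp [hrowsdef]
  -- B's second loop as a flatMap
  have hfun :
      (fun (out : List (List Int)) (p : Int × List Int) =>
        (out ++ [p.2]) ++ [((PySem.List.pyGet? rows (-p.1)).getD []).reverse]) =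
      (fun out p => out ++
          ([p.2] ++ [((PySem.List.pyGet? rows (-p.1)).getD []).reverse])) := by
    funext out p
    simp [List.append_assoc]
  rw [hfun, PySem.List.foldl_append_eq_flatMap, List.nil_append]
  rw [PySem.List.enumerate_eq_map_pyRange rows ([] : List Int)]
  rw [show PySem.List.len rows = ((n : Nat) : Int) by simp [PySem.List.len, hrowslen]]
  rw [List.flatMap_map, ← hn]
  -- pointwise over the common index list
  apply List.flatMap_congr
  intro i hi
  rw [PySem.List.mem_pyRange_one] at hi
  obtain ⟨h0i, hlt⟩ := hi
  obtain ⟨k, rfl⟩ : ∃ k : ℕ, (k : Int) = i := ⟨i.toNat, Int.toNat_of_nonneg h0i⟩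
  have hkn : k < n := by exact_mod_cast hlt
  have hk : k ≤ s.length := by omega
  have hkr : k ≤ s.reverse.length := by simpa using hk
  -- A's element
  rw [show ((k : Int) + (s.length : Int)) = ((k : Int) + (s.reverse.length : Int)) by simp]
  rw [slice_doubled s.reverse k hkr]
  rw [show ((k : Int) + (s.reverse.length : Int)) = ((k : Int) + (s.length : Int)) by simp]
  rw [slice_doubled s k hk]
  simp only [List.map_cons, List.map_nil, PySem.List.foldl_append_singleton_eq_map,
    List.nil_append]
  -- B's element
  rw [PySem.List.pyGetD_natCast rows k ([] : List Int)]
  rw [hrowsdef, PySem.List.getD_map_range (fun i => rotL i M) n k ([] : List Int) hkn]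
  rw [pyget_neg M n k hMlen hkn]
  unfold rotL
  simp only [hM, hf, List.map_append, List.map_take, List.map_drop, List.map_reverse,
    List.singleton_append]

-- ===== VERDICT (by name: the statement is the Claim_ definition above) =====
theorem printeverypeptide_spec : Claim_equal_printeverypeptide := by
  intro peptide _ hpre
  exact printeverypeptide_spec' peptide hpre
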